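-- pv_equiv track=rewrite | github.com/Niivas/Problem-Solving | 2101-last-day-where-you-can-still-cross/2101-last-day-where-you-can-still-cross.py | isPossibleToCross
-- ===== SOURCE A (Python) =====
-- import collections
-- from typing import List
--
-- def isPossibleToCross(row: int, col: int, cells: List[List[int]], day: int) -> bool:
--     # Initialize the grid with all cells set to 0
--     grid = [[0] * col for _ in range(row)]
--     queue = collections.deque()
--
--     # Mark the cells as blocked for the given day
--     for r, c in cells[:day]:
--         grid[r - 1][c - 1] = 1
--
--     # Enqueue the cells in the first row that are not blocked
--     for i in range(col):
--         if not grid[0][i]: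
--             queue.append((0, i))
--             grid[0][i] = -1
--
--     # Perform a BFS traversal of the grid
--     while queue:
--         r, c = queue.popleft()
--         if r == row - 1:
--             return True
--         for dr, dc in [(1, 0), (-1, 0), (0, 1), (0, -1)]:
--             nr, nc = r + dr, c + dc
--             if 0 <= nr < row and 0 <= nc < col and grid[nr][nc] == 0:
--                 grid[nr][nc] = -1
--                 queue.append((nr, nc))
--
--     return False
-- ===== SOURCE B (Python) =====
-- from typing import List
--
-- def isPossibleToCross(row: int, col: int, cells: List[List[int]], day: int) -> bool:
--     # Same blocked grid as the problem statement prescribes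
--     grid = [[0] * col for _ in range(row)]
--     for r, c in cells[:day]:
--         grid[r - 1][c - 1] = 1
--
--     # Saturation: start from the open cells of the first row and repeatedly
--     # sweep the whole grid, marking any open cell adjacent to a marked cell,
--     # until a full sweep changes nothing.  No queue/wavefront is kept.
--     reached = [[r == 0 and grid[r][c] == 0 for c in range(col)] for r in range(row)]
--     changed = True
--     while changed:
--         changed = False
--         for r in range(row):
--             for c in range(col):
--                 if not reached[r][c] and grid[r][c] == 0:
--                     if ((r + 1 < row and reached[r + 1][c])
--                             or (r - 1 >= 0 and reached[r - 1][c])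
--                             or (c + 1 < col and reached[r][c + 1])
--                             or (c - 1 >= 0 and reached[r][c - 1])):
--                         reached[r][c] = True
--                         changed = True
--     return row >= 1 and any(reached[row - 1])
-- ===== Notes on version B (the rewrite author's own statement) =====
-- stated objective: alternative
-- what changed: BFS with a deque and in-grid visited marks is replaced by a queue-free fixpoint saturation: a boolean reached-matrix seeded from the open first row is swept whole-grid until a sweep changes nothing, then the last row is tested.
import Mathlib
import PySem

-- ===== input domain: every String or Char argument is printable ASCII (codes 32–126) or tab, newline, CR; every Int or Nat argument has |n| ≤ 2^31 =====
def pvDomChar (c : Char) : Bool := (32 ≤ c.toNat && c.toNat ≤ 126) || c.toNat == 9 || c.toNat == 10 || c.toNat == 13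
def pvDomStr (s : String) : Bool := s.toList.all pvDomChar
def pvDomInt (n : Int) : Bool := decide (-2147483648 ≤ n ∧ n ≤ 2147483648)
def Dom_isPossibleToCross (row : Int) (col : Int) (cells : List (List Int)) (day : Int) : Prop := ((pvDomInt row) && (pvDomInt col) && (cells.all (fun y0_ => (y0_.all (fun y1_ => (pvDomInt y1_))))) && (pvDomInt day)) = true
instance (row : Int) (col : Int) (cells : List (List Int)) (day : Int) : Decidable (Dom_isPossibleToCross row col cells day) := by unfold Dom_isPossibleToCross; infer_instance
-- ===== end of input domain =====

-- B replaces A's BFS (deque wavefront over a mutated grid) by repeated whole-grid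
-- sweeps to a fixpoint over a reached-matrix (no queue); same blocked grid.
-- Objective: alternative — a genuinely different algorithm, not claimed faster.

-- Helpers shared by both ports: 2-d read with default / 2-d write, the grid build and
-- the blocked-cell marking loop (identical Python code in A and in B).
def pvGet {α : Type} (d : α) (g : List (List α)) (r c : Int) : α :=
  PySem.List.pyGetD (PySem.List.pyGetD g r []) c d

def pvSet {α : Type} (g : List (List α)) (r c : Int) (v : α) : List (List α) :=
  PySem.List.pySetD g r (PySem.List.pySetD (PySem.List.pyGetD g r []) c v)

-- grid = [[0] * col for _ in range(row)]
def pvGrid (row col : Int) : List (List Int) :=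
  (PySem.List.pyRange 0 row 1).map (fun _ => PySem.List.pyRepeat [(0 : Int)] col)

-- for r, c in cells[:day]: grid[r - 1][c - 1] = 1   (none = IndexError/ValueError)
def pvMark (g : List (List Int)) (taken : List (List Int)) : Option (List (List Int)) :=
  taken.foldl (fun og xs => og.bind (fun g =>
    match xs with
    | [r, c] =>
      (PySem.List.pyGet? g (r - 1)).bind (fun rw =>
      (PySem.List.pySet? rw (c - 1) 1).bind (fun rw' =>
      PySem.List.pySet? g (r - 1) rw'))
    | _ => none)) (some g)

-- ===== PORT A =====
def pvDirs : List (Int × Int) := [(1, 0), (-1, 0), (0, 1), (0, -1)]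

def pvZeros (g : List (List Int)) : Nat :=
  (g.map (fun rw => rw.countP (fun v => v == 0))).sum

def pvStep (row col r c : Int) (s : List (List Int) × List (Int × Int)) (d : Int × Int) :
    List (List Int) × List (Int × Int) :=
  let nr := r + d.1
  let nc := c + d.2
  if 0 ≤ nr ∧ nr < row ∧ 0 ≤ nc ∧ nc < col ∧ pvGet 9 s.1 nr nc = 0 then
    (pvSet s.1 nr nc (-1), s.2 ++ [(nr, nc)])
  else s

-- The lemmas up to pvFold_measure are cited by pvBfs's decreasing_by (the BFS
-- termination measure: open cells + queue length is preserved by the expansion fold).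
theorem pvGet_eq {α : Type} (d : α) (g : List (List α)) (r c : Int) (hr : 0 ≤ r) (hc : 0 ≤ c) :
    pvGet d g r c = ((g[r.toNat]?.getD [])[c.toNat]?).getD d := by
  have h1 : r = (r.toNat : Int) := (Int.toNat_of_nonneg hr).symm
  have h2 : c = (c.toNat : Int) := (Int.toNat_of_nonneg hc).symm
  rw [pvGet, h1, h2, PySem.List.pyGetD_natCast, PySem.List.pyGetD_natCast,
    List.getD_eq_getElem?_getD, List.getD_eq_getElem?_getD]
  simp
  rw [max_eq_left hr, max_eq_left hc]

theorem pvGet_ne_default {α : Type} [DecidableEq α] (d : α) (g : List (List α)) (r c : Int)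
    (hr : 0 ≤ r) (hc : 0 ≤ c) (h : pvGet d g r c ≠ d) :
    ∃ rw, g[r.toNat]? = some rw ∧ rw[c.toNat]? = some (pvGet d g r c) := by
  rw [pvGet_eq d g r c hr hc] at h ⊢
  cases hg : g[r.toNat]? with
  | none => simp [hg] at h
  | some rw =>
    cases hc2 : rw[c.toNat]? with
    | none => simp [hg, hc2] at h
    | some v => exact ⟨rw, rfl, by simp [hg, hc2]⟩

theorem pvSet_eq {α : Type} (g : List (List α)) (r c : Int) (v : α) (rw : List α)
    (hr : 0 ≤ r) (hc : 0 ≤ c) (hg : g[r.toNat]? = some rw) :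
    pvSet g r c v = g.set r.toNat (rw.set c.toNat v) := by
  have h1 : r = (r.toNat : Int) := (Int.toNat_of_nonneg hr).symm
  have h2 : c = (c.toNat : Int) := (Int.toNat_of_nonneg hc).symm
  rw [pvSet, h1, h2, PySem.List.pyGetD_natCast, PySem.List.pySetD_natCast,
    PySem.List.pySetD_natCast]
  simp [List.getD_eq_getElem?_getD, hg]
  rw [max_eq_left hr, max_eq_left hc]

theorem countP_set_dec (l : List Int) (i : Nat) (h : l[i]? = some 0) :
    (l.set i (-1)).countP (fun v => v == 0) + 1 = l.countP (fun v => v == 0) := by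
  induction l generalizing i with
  | nil => simp at h
  | cons x xs ih =>
    cases i with
    | zero =>
      simp at h
      simp [List.set, List.countP_cons, h]
    | succ j =>
      simp only [List.getElem?_cons_succ] at h
      rw [List.set_cons_succ, List.countP_cons, List.countP_cons]
      have := ih j h
      omega

theorem pvZeros_setrow (g : List (List Int)) (n : Nat) (x rw : List Int)
    (hg : g[n]? = some rw) :
    pvZeros (g.set n x) + rw.countP (fun v => v == 0) =
      pvZeros g + x.countP (fun v => v == 0) := by
  induction g generalizing n with
  | nil => simp at hg
  | cons y ys ih =>
    cases n with
    | zero =>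
      simp only [List.getElem?_cons_zero, Option.some.injEq] at hg
      subst hg
      simp only [List.set_cons_zero, pvZeros, List.map_cons, List.sum_cons]
      omega
    | succ m =>
      simp only [List.getElem?_cons_succ] at hg
      rw [List.set_cons_succ]
      simp only [pvZeros, List.map_cons, List.sum_cons]
      have := ih m hg
      simp only [pvZeros] at this
      omega

theorem pvZeros_set (g : List (List Int)) (r c : Int) (hr : 0 ≤ r) (hc : 0 ≤ c)
    (h : pvGet 9 g r c = 0) : pvZeros (pvSet g r c (-1)) + 1 = pvZeros g := by
  obtain ⟨rw, hg, hc2⟩ := pvGet_ne_default 9 g r c hr hc (by rw [h]; decide)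
  rw [h] at hc2
  rw [pvSet_eq g r c (-1) rw hr hc hg]
  have h1 := pvZeros_setrow g r.toNat (rw.set c.toNat (-1)) rw hg
  have h2 := countP_set_dec rw c.toNat hc2
  omega

theorem pvStep_measure (row col r c : Int) (s : List (List Int) × List (Int × Int))
    (d : Int × Int) :
    pvZeros (pvStep row col r c s d).1 + (pvStep row col r c s d).2.length =
      pvZeros s.1 + s.2.length := by
  simp only [pvStep]
  split_ifs with h
  · simp only [List.length_append, List.length_cons, List.length_nil]
    have := pvZeros_set s.1 (r + d.1) (c + d.2) h.1 h.2.2.1 h.2.2.2.2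
    omega
  · rfl

theorem pvFold_measure (row col r c : Int) (l : List (Int × Int))
    (s : List (List Int) × List (Int × Int)) :
    pvZeros (l.foldl (pvStep row col r c) s).1 + (l.foldl (pvStep row col r c) s).2.length =
      pvZeros s.1 + s.2.length := by
  induction l generalizing s with
  | nil => rfl
  | cons d l ih =>
    rw [List.foldl_cons, ih (pvStep row col r c s d), pvStep_measure]

def pvExpand (row col r c : Int) (g : List (List Int)) (qs : List (Int × Int)) :
    List (List Int) × List (Int × Int) :=
  pvDirs.foldl (pvStep row col r c) (g, qs)

def pvBfs (row col : Int) (g : List (List Int)) (q : List (Int × Int)) : Bool :=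
  match q with
  | [] => false
  | (r, c) :: qs =>
    if r = row - 1 then true
    else
      pvBfs row col (pvExpand row col r c g qs).1 (pvExpand row col r c g qs).2
termination_by pvZeros g + q.length
decreasing_by
  have h := pvFold_measure row col r c pvDirs (g, qs)
  simp only [pvExpand]
  simp only [List.length_cons] at *
  omega

-- enqueue the open cells of the first row
def pvSeed (col : Int) (g : List (List Int)) : List (List Int) × List (Int × Int) :=
  (PySem.List.pyRange 0 col 1).foldl (fun s i =>
    if pvGet 9 s.1 0 i = 0 then (pvSet s.1 0 i (-1), s.2 ++ [((0 : Int), i)]) else s)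
    (g, [])

-- ===== spec-level reachability =====

def isPossibleToCross (row : Int) (col : Int) (cells : List (List Int)) (day : Int) : Bool :=
  match pvMark (pvGrid row col) (PySem.List.slice cells none (some day)) with
  | none => false
  | some g =>
    let s := pvSeed col g
    pvBfs row col s.1 s.2

-- ===== PORT B =====
-- reached = [[r == 0 and grid[r][c] == 0 for c in range(col)] for r in range(row)]
def pvReach0 (row col : Int) (g : List (List Int)) : List (List Bool) :=
  (PySem.List.pyRange 0 row 1).map (fun r =>
    (PySem.List.pyRange 0 col 1).map (fun c => decide (r = 0) && (pvGet 9 g r c == 0)))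

-- the inner `for c in range(col):` of one sweep
def pvPassInner (row col : Int) (g : List (List Int)) (r : Int)
    (s : List (List Bool) × Bool) : List (List Bool) × Bool :=
  (PySem.List.pyRange 0 col 1).foldl (fun s c =>
    if pvGet false s.1 r c = false ∧ pvGet 9 g r c = 0 ∧
        ((r + 1 < row ∧ pvGet false s.1 (r + 1) c = true) ∨
         (0 ≤ r - 1 ∧ pvGet false s.1 (r - 1) c = true) ∨
         (c + 1 < col ∧ pvGet false s.1 r (c + 1) = true) ∨
         (0 ≤ c - 1 ∧ pvGet false s.1 r (c - 1) = true)) then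
      (pvSet s.1 r c true, true)
    else s) s

-- one full sweep of the grid; .2 = `changed`
def pvPass (row col : Int) (g : List (List Int)) (R : List (List Bool)) :
    List (List Bool) × Bool :=
  (PySem.List.pyRange 0 row 1).foldl (fun s r => pvPassInner row col g r s) (R, false)

-- `while changed:` — the fuel only makes the loop total; pvSat_ok below proves that
-- `pvFalses R + 1` passes always suffice, so the port computes the Python fixpoint
def pvSat (row col : Int) (g : List (List Int)) (fuel : Nat) (R : List (List Bool)) :
    List (List Bool) :=
  match fuel with
  | 0 => R
  | fuel + 1 =>
    let s := pvPass row col g R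
    if s.2 then pvSat row col g fuel s.1 else s.1

-- the sweep's flip condition, named for the lemmas below (same formula as in pvPassInner)

-- unreached-cell count: the fuel bound
def pvFalses (R : List (List Bool)) : Nat :=
  (R.map (fun rw => rw.countP (fun b => b == false))).sum

def isPossibleToCross_alt (row : Int) (col : Int) (cells : List (List Int)) (day : Int) : Bool :=
  match pvMark (pvGrid row col) (PySem.List.slice cells none (some day)) with
  | none => false
  | some g =>
    let R0 := pvReach0 row col g
    let R := pvSat row col g (pvFalses R0 + 1) R0
    decide (1 ≤ row) && (PySem.List.pyGetD R (row - 1) []).any id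

-- ===== PRECONDITION & SPEC =====
-- Pre_ excludes exactly the inputs where A raises: row ≤ 0 with col > 0 (IndexError on
-- grid[0][i]) and entries of cells[:day] that are not pairs (ValueError) or whose
-- Python indices r-1 / c-1 fall outside the grid, negative wraparound included
-- (IndexError).  Wrapped in-range indices (r = 0 or c = 0) stay inside Pre_.
def Pre_isPossibleToCross (row : Int) (col : Int) (cells : List (List Int)) (day : Int) : Prop :=
  (1 ≤ row ∨ col ≤ 0) ∧
  ∀ xs ∈ PySem.List.slice cells none (some day),
    xs.length = 2 ∧
    -row ≤ xs.getD 0 0 - 1 ∧ xs.getD 0 0 - 1 < row ∧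
    -col ≤ xs.getD 1 0 - 1 ∧ xs.getD 1 0 - 1 < col

instance (row : Int) (col : Int) (cells : List (List Int)) (day : Int) :
    Decidable (Pre_isPossibleToCross row col cells day) := by
  unfold Pre_isPossibleToCross; infer_instance

def pvWitness_isPossibleToCross : Int × Int × List (List Int) × Int := (2, 2, [[1, 1]], 1)

def Spec_isPossibleToCross (row : Int) (col : Int) (cells : List (List Int)) (day : Int) (out : Bool) : Prop := out = isPossibleToCross_alt row col cells day
instance (row : Int) (col : Int) (cells : List (List Int)) (day : Int) (out : Bool) : Decidable (Spec_isPossibleToCross row col cells day out) := by unfold Spec_isPossibleToCross; infer_instance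

-- ===== CLAIM (what is proved, stated in full; the proofs are below) =====
def Claim_equal_isPossibleToCross : Prop := ∀ (row : Int) (col : Int) (cells : List (List Int)) (day : Int), Dom_isPossibleToCross row col cells day → Pre_isPossibleToCross row col cells day → Spec_isPossibleToCross row col cells day (isPossibleToCross row col cells day)

-- ===== LEMMAS AND PROOFS =====
def pvInb (row col r c : Int) : Prop := 0 ≤ r ∧ r < row ∧ 0 ≤ c ∧ c < col

def pvShape {α : Type} (row col : Int) (g : List (List α)) : Prop :=
  g.length = row.toNat ∧ ∀ x ∈ g, x.length = col.toNat

theorem pvShape_cell {α : Type} (d : α) {row col : Int} {g : List (List α)}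
    (hs : pvShape row col g) {r c : Int} (hin : pvInb row col r c) :
    ∃ rw, g[r.toNat]? = some rw ∧ rw.length = col.toNat ∧
      rw[c.toNat]? = some (pvGet d g r c) := by
  obtain ⟨h1, h2, h3, h4⟩ := hin
  have hr : r.toNat < g.length := by rw [hs.1]; omega
  refine ⟨g[r.toNat], List.getElem?_eq_getElem hr, hs.2 _ (List.getElem_mem hr), ?_⟩
  have hc : c.toNat < g[r.toNat].length := by rw [hs.2 _ (List.getElem_mem hr)]; omega
  rw [pvGet_eq d g r c h1 h3, List.getElem?_eq_getElem hr]
  simp [List.getElem?_eq_getElem hc]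

theorem pvGet_set_self {α : Type} (d v : α) {row col : Int} {g : List (List α)}
    (hs : pvShape row col g) {r c : Int} (hin : pvInb row col r c) :
    pvGet d (pvSet g r c v) r c = v := by
  obtain ⟨rw, hg, hlen, -⟩ := pvShape_cell d hs hin
  obtain ⟨h1, h2, h3, h4⟩ := hin
  have hr : r.toNat < g.length := by rw [hs.1]; omega
  have hc : c.toNat < rw.length := by rw [hlen]; omega
  rw [pvSet_eq g r c v rw h1 h3 hg, pvGet_eq d _ r c h1 h3,
    List.getElem?_set_self (by simpa using hr)]
  simp [List.getElem?_set_self (by simpa [List.length_set] using hc)]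

theorem pvGet_set_ne {α : Type} (d v : α) {row col : Int} {g : List (List α)}
    (hs : pvShape row col g) {r c : Int} (hin : pvInb row col r c) (r' c' : Int)
    (h1 : 0 ≤ r') (h2 : 0 ≤ c') (hne : ¬(r' = r ∧ c' = c)) :
    pvGet d (pvSet g r c v) r' c' = pvGet d g r' c' := by
  obtain ⟨rw, hg, hlen, -⟩ := pvShape_cell d hs hin
  obtain ⟨hr0, hr1, hc0, hc1⟩ := hin
  rw [pvSet_eq g r c v rw hr0 hc0 hg, pvGet_eq d _ r' c' h1 h2, pvGet_eq d g r' c' h1 h2]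
  by_cases hrr : r'.toNat = r.toNat
  · have : r' = r := by omega
    subst this
    have hne' : c'.toNat ≠ c.toNat := by omega
    have hr : r'.toNat < g.length := by rw [hs.1]; omega
    rw [List.getElem?_set_self hr, hg]
    simp [List.getElem?_set_ne (fun h => hne' h.symm)]
  · rw [List.getElem?_set_ne (fun h => hrr h.symm)]

theorem pvShape_set {α : Type} (v : α) {row col : Int} {g : List (List α)}
    (hs : pvShape row col g) {r c : Int} (hin : pvInb row col r c) :
    pvShape row col (pvSet g r c v) := by
  obtain ⟨rw, hg, hlen, -⟩ := pvShape_cell v hs hin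
  obtain ⟨h1, h2, h3, h4⟩ := hin
  rw [pvSet_eq g r c v rw h1 h3 hg]
  constructor
  · rw [List.length_set, hs.1]
  · intro x hx
    rcases List.mem_or_eq_of_mem_set hx with h | h
    · exact hs.2 x h
    · subst h; rw [List.length_set, hlen]

theorem countP_set_decB (l : List Bool) (i : Nat) (h : l[i]? = some false) :
    (l.set i true).countP (fun b => b == false) + 1 = l.countP (fun b => b == false) := by
  induction l generalizing i with
  | nil => simp at h
  | cons x xs ih =>
    cases i with
    | zero =>
      simp at h
      simp [List.set, List.countP_cons, h]
    | succ j =>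
      simp only [List.getElem?_cons_succ] at h
      rw [List.set_cons_succ, List.countP_cons, List.countP_cons]
      have := ih j h
      omega

theorem pvFalses_setrow (g : List (List Bool)) (n : Nat) (x rw : List Bool)
    (hg : g[n]? = some rw) :
    pvFalses (g.set n x) + rw.countP (fun b => b == false) =
      pvFalses g + x.countP (fun b => b == false) := by
  induction g generalizing n with
  | nil => simp at hg
  | cons y ys ih =>
    cases n with
    | zero =>
      simp only [List.getElem?_cons_zero, Option.some.injEq] at hg
      subst hg
      simp only [List.set_cons_zero, pvFalses, List.map_cons, List.sum_cons]
      omega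
    | succ m =>
      simp only [List.getElem?_cons_succ] at hg
      rw [List.set_cons_succ]
      simp only [pvFalses, List.map_cons, List.sum_cons]
      have := ih m hg
      simp only [pvFalses] at this
      omega

theorem pvFalses_set {row col : Int} {R : List (List Bool)} (hs : pvShape row col R)
    {r c : Int} (hin : pvInb row col r c) (h : pvGet false R r c = false) :
    pvFalses (pvSet R r c true) + 1 = pvFalses R := by
  obtain ⟨rw, hg, hlen, hc2⟩ := pvShape_cell false hs hin
  rw [h] at hc2
  rw [pvSet_eq R r c true rw hin.1 hin.2.2.1 hg]
  have h1 := pvFalses_setrow R r.toNat (rw.set c.toNat true) rw hg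
  have h2 := countP_set_decB rw c.toNat hc2
  omega

def pvLand (row col : Int) (g0 : List (List Int)) (r c : Int) : Prop :=
  pvInb row col r c ∧ pvGet 9 g0 r c = 0

def pvAdj (r c r' c' : Int) : Prop :=
  (r' = r + 1 ∧ c' = c) ∨ (r' = r - 1 ∧ c' = c) ∨ (r' = r ∧ c' = c + 1) ∨ (r' = r ∧ c' = c - 1)

inductive pvReach (row col : Int) (g0 : List (List Int)) : Int → Int → Prop
  | top (c : Int) : pvLand row col g0 0 c → pvReach row col g0 0 c
  | step (r c r' c' : Int) : pvReach row col g0 r c → pvLand row col g0 r' c' →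
      pvAdj r c r' c' → pvReach row col g0 r' c'

theorem pvReach_land {row col : Int} {g0 : List (List Int)} {r c : Int}
    (h : pvReach row col g0 r c) : pvLand row col g0 r c := by
  cases h with
  | top c h => exact h
  | step a b a' b' _ h _ => exact h

theorem pvAdj_of_dir (r c : Int) (d : Int × Int) (hd : d ∈ pvDirs) :
    pvAdj r c (r + d.1) (c + d.2) := by
  simp only [pvDirs, List.mem_cons, List.not_mem_nil, or_false] at hd
  rcases hd with rfl | rfl | rfl | rfl <;> simp [pvAdj] <;> omega

theorem pvAdj_dirs {r c r' c' : Int} (h : pvAdj r c r' c') :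
    ∃ d ∈ pvDirs, r' = r + d.1 ∧ c' = c + d.2 := by
  rcases h with ⟨h1, h2⟩ | ⟨h1, h2⟩ | ⟨h1, h2⟩ | ⟨h1, h2⟩
  · exact ⟨(1, 0), by simp [pvDirs], by omega, by omega⟩
  · exact ⟨(-1, 0), by simp [pvDirs], by omega, by omega⟩
  · exact ⟨(0, 1), by simp [pvDirs], by omega, by omega⟩
  · exact ⟨(0, -1), by simp [pvDirs], by omega, by omega⟩

-- ===== BFS invariants =====

structure pvInvA (row col : Int) (g0 g : List (List Int)) (q : List (Int × Int)) : Prop where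
  shape : pvShape row col g
  rel : ∀ r c, pvInb row col r c → pvGet 9 g r c = -1 ∨ pvGet 9 g r c = pvGet 9 g0 r c
  vis : ∀ r c, pvInb row col r c → pvGet 9 g r c = -1 → pvReach row col g0 r c
  qinv : ∀ p ∈ q, pvInb row col p.1 p.2 ∧ pvGet 9 g p.1 p.2 = -1
  seed : ∀ c, pvLand row col g0 0 c → pvGet 9 g 0 c = -1
  closed : ∀ r c, pvInb row col r c → pvGet 9 g r c = -1 → (r, c) ∉ q →
    r ≠ row - 1 ∧ ∀ r' c', pvAdj r c r' c' → pvLand row col g0 r' c' → pvGet 9 g r' c' = -1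

structure pvMid (row col : Int) (g0 g : List (List Int)) (r c : Int)
    (qs done : List (Int × Int)) (s : List (List Int) × List (Int × Int)) : Prop where
  shape : pvShape row col s.1
  rel : ∀ a b, pvInb row col a b → pvGet 9 s.1 a b = -1 ∨ pvGet 9 s.1 a b = pvGet 9 g0 a b
  vis : ∀ a b, pvInb row col a b → pvGet 9 s.1 a b = -1 → pvReach row col g0 a b
  seed : ∀ cc, pvLand row col g0 0 cc → pvGet 9 s.1 0 cc = -1
  q2 : ∀ p ∈ s.2, pvInb row col p.1 p.2 ∧ pvGet 9 s.1 p.1 p.2 = -1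
  sub : ∀ p ∈ qs, p ∈ s.2
  mono : ∀ a b, pvInb row col a b → pvGet 9 g a b = -1 → pvGet 9 s.1 a b = -1
  newv : ∀ a b, pvInb row col a b → pvGet 9 s.1 a b = -1 →
    pvGet 9 g a b = -1 ∨ (a, b) ∈ s.2
  proc : ∀ d ∈ done, pvLand row col g0 (r + d.1) (c + d.2) →
    pvGet 9 s.1 (r + d.1) (c + d.2) = -1

theorem pvMid_step {row col : Int} {g0 g : List (List Int)} {r c : Int}
    {qs done : List (Int × Int)} {s : List (List Int) × List (Int × Int)} (d : Int × Int)
    (hd : d ∈ pvDirs) (hrc : pvReach row col g0 r c)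
    (hm : pvMid row col g0 g r c qs done s) :
    pvMid row col g0 g r c qs (done ++ [d]) (pvStep row col r c s d) := by
  simp only [pvStep]
  split_ifs with h
  · obtain ⟨h1, h2, h3, h4, h5⟩ := h
    have hin : pvInb row col (r + d.1) (c + d.2) := ⟨h1, h2, h3, h4⟩
    have hland : pvLand row col g0 (r + d.1) (c + d.2) := by
      rcases hm.rel _ _ hin with hv | he
      · rw [h5] at hv; exact absurd hv (by decide)
      · exact ⟨hin, by rw [← he, h5]⟩
    have hself : pvGet 9 (pvSet s.1 (r + d.1) (c + d.2) (-1)) (r + d.1) (c + d.2) = -1 :=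
      pvGet_set_self 9 (-1) hm.shape hin
    have keep : ∀ a b, 0 ≤ a → 0 ≤ b → pvGet 9 s.1 a b = -1 →
        pvGet 9 (pvSet s.1 (r + d.1) (c + d.2) (-1)) a b = -1 := by
      intro a b ha hb hv
      by_cases he : a = r + d.1 ∧ b = c + d.2
      · rw [he.1, he.2]; exact hself
      · rw [pvGet_set_ne 9 (-1) hm.shape hin a b ha hb he]; exact hv
    refine { shape := pvShape_set _ hm.shape hin, rel := ?_, vis := ?_, seed := ?_, q2 := ?_, sub := ?_, mono := ?_, newv := ?_, proc := ?_ }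
    · intro a b hab
      by_cases he : a = r + d.1 ∧ b = c + d.2
      · rw [he.1, he.2]; exact Or.inl hself
      · rw [pvGet_set_ne 9 (-1) hm.shape hin a b hab.1 hab.2.2.1 he]; exact hm.rel a b hab
    · intro a b hab hv
      by_cases he : a = r + d.1 ∧ b = c + d.2
      · rw [he.1, he.2]
        exact pvReach.step r c _ _ hrc hland (pvAdj_of_dir r c d hd)
      · rw [pvGet_set_ne 9 (-1) hm.shape hin a b hab.1 hab.2.2.1 he] at hv
        exact hm.vis a b hab hv
    · intro cc hl
      exact keep 0 cc le_rfl hl.1.2.2.1 (hm.seed cc hl)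
    · intro p hp
      rcases List.mem_append.1 hp with hp | hp
      · obtain ⟨hpi, hpv⟩ := hm.q2 p hp
        exact ⟨hpi, keep p.1 p.2 hpi.1 hpi.2.2.1 hpv⟩
      · simp only [List.mem_singleton] at hp
        subst hp
        exact ⟨hin, hself⟩
    · intro p hp; exact List.mem_append_left _ (hm.sub p hp)
    · intro a b hab hv; exact keep a b hab.1 hab.2.2.1 (hm.mono a b hab hv)
    · intro a b hab hv
      by_cases he : a = r + d.1 ∧ b = c + d.2
      · refine Or.inr (List.mem_append_right _ ?_)
        simp [he.1, he.2]
      · rw [pvGet_set_ne 9 (-1) hm.shape hin a b hab.1 hab.2.2.1 he] at hv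
        rcases hm.newv a b hab hv with hv | hv
        · exact Or.inl hv
        · exact Or.inr (List.mem_append_left _ hv)
    · intro d' hd' hld'
      rcases List.mem_append.1 hd' with hd' | hd'
      · exact keep _ _ hld'.1.1 hld'.1.2.2.1 (hm.proc d' hd' hld')
      · simp only [List.mem_singleton] at hd'
        subst hd'
        exact hself
  · refine { shape := hm.shape, rel := hm.rel, vis := hm.vis, seed := hm.seed, q2 := hm.q2, sub := hm.sub, mono := hm.mono, newv := hm.newv, proc := ?_ }
    intro d' hd' hld'
    rcases List.mem_append.1 hd' with hd' | hd'
    · exact hm.proc d' hd' hld'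
    · simp only [List.mem_singleton] at hd'
      subst hd'
      obtain ⟨⟨k1, k2, k3, k4⟩, hv0⟩ := hld'
      rcases hm.rel _ _ ⟨k1, k2, k3, k4⟩ with hv | he
      · exact hv
      · exact absurd ⟨k1, k2, k3, k4, by rw [he, hv0]⟩ h

theorem pvFold_mid {row col : Int} {g0 g : List (List Int)} {r c : Int}
    {qs : List (Int × Int)} (hrc : pvReach row col g0 r c) :
    ∀ (l done : List (Int × Int)) (s : List (List Int) × List (Int × Int)),
      (∀ d ∈ l, d ∈ pvDirs) → pvMid row col g0 g r c qs done s →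
      pvMid row col g0 g r c qs (done ++ l) (l.foldl (pvStep row col r c) s) := by
  intro l
  induction l with
  | nil => intro done s _ hm; simpa using hm
  | cons d l ih =>
    intro done s hl hm
    have := ih (done ++ [d]) (pvStep row col r c s d)
      (fun d' hd' => hl d' (List.mem_cons_of_mem _ hd'))
      (pvMid_step d (hl d (List.mem_cons_self)) hrc hm)
    simpa [List.append_assoc] using this

theorem pvExpand_inv {row col : Int} {g0 g : List (List Int)} {r c : Int}
    {qs : List (Int × Int)} (hinv : pvInvA row col g0 g ((r, c) :: qs))
    (hne : r ≠ row - 1) :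
    pvInvA row col g0 (pvExpand row col r c g qs).1 (pvExpand row col r c g qs).2 := by
  have hq := hinv.qinv (r, c) (List.mem_cons_self)
  have hrc : pvReach row col g0 r c := hinv.vis r c hq.1 hq.2
  have h0 : pvMid row col g0 g r c qs [] (g, qs) :=
    { shape := hinv.shape, rel := hinv.rel, vis := hinv.vis, seed := hinv.seed,
      q2 := fun p hp => hinv.qinv p (List.mem_cons_of_mem _ hp),
      sub := fun p hp => hp, mono := fun a b _ h => h,
      newv := fun a b _ h => Or.inl h, proc := fun d hd => absurd hd (List.not_mem_nil) }
  have hm := pvFold_mid hrc pvDirs [] (g, qs) (fun d hd => hd) h0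
  refine pvInvA.mk hm.shape hm.rel hm.vis hm.q2 hm.seed ?_
  intro a b hin hv hnq
  rcases hm.newv a b hin hv with hold | hmem
  · by_cases heq : a = r ∧ b = c
    · obtain ⟨heq1, heq2⟩ := heq
      subst heq1; subst heq2
      refine ⟨hne, ?_⟩
      intro r' c' hadj hland
      obtain ⟨d, hd, he1, he2⟩ := pvAdj_dirs hadj
      subst he1; subst he2
      exact hm.proc d (by simpa using hd) hland
    · have hnot : (a, b) ∉ (r, c) :: qs := by
        intro hmem'
        rcases List.mem_cons.1 hmem' with hmem' | hmem'
        · exact heq ⟨congrArg Prod.fst hmem', congrArg Prod.snd hmem'⟩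
        · exact hnq (hm.sub _ hmem')
      obtain ⟨hne', hcl⟩ := hinv.closed a b hin hold hnot
      exact ⟨hne', fun r' c' hadj hland =>
        hm.mono r' c' hland.1 (hcl r' c' hadj hland)⟩
  · exact absurd hmem hnq

theorem pvReach_visited {row col : Int} {g0 g : List (List Int)}
    (hinv : pvInvA row col g0 g []) :
    ∀ r c, pvReach row col g0 r c → pvGet 9 g r c = -1 := by
  intro r c h
  induction h with
  | top cc hl => exact hinv.seed cc hl
  | step a b a' b' hr hl hadj ih =>
    have hland := pvReach_land hr
    obtain ⟨-, hcl⟩ := hinv.closed a b hland.1 ih (List.not_mem_nil)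
    exact hcl a' b' hadj hl

theorem pvBfs_iff (row col : Int) (g0 : List (List Int)) :
    ∀ g q, pvInvA row col g0 g q →
      (pvBfs row col g q = true ↔ ∃ c, pvReach row col g0 (row - 1) c) := by
  intro g q
  fun_induction pvBfs row col g q with
  | case1 g =>
    intro hinv
    simp only [Bool.false_eq_true, false_iff]
    rintro ⟨c, hreach⟩
    have hland := pvReach_land hreach
    have hv := pvReach_visited hinv (row - 1) c hreach
    obtain ⟨hne, -⟩ := hinv.closed (row - 1) c hland.1 hv (List.not_mem_nil)
    exact hne rfl
  | case2 g c qs =>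
    intro hinv
    simp only [true_iff]
    have hq := hinv.qinv (row - 1, c) (List.mem_cons_self)
    exact ⟨c, hinv.vis (row - 1) c hq.1 hq.2⟩
  | case3 g r c qs hne ih =>
    intro hinv
    exact ih (pvExpand_inv hinv hne)

def pvOk (row col : Int) (g : List (List Int)) : Prop :=
  pvShape row col g ∧ ∀ a b, pvInb row col a b → pvGet 9 g a b = 0 ∨ pvGet 9 g a b = 1

theorem pvIdx_some (n : Nat) (i : Int) (h1 : -(n : Int) ≤ i) (h2 : i < n) :
    ∃ k, k < n ∧ PySem.List.pyIdx? n i = some k := by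
  by_cases p : 0 ≤ i
  · refine ⟨i.toNat, by omega, ?_⟩
    simp only [PySem.List.pyIdx?, if_pos p, if_pos h2]
  · refine ⟨n - (-i).toNat, by omega, ?_⟩
    simp only [PySem.List.pyIdx?, if_neg p, if_pos h1]

theorem pvMarkStep (row col : Int) (g : List (List Int)) (hok : pvOk row col g) (r c : Int)
    (b1 : -row ≤ r - 1) (b2 : r - 1 < row) (b3 : -col ≤ c - 1) (b4 : c - 1 < col) :
    ∃ g', ((PySem.List.pyGet? g (r - 1)).bind (fun rw =>
      (PySem.List.pySet? rw (c - 1) 1).bind (fun rw' =>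
      PySem.List.pySet? g (r - 1) rw'))) = some g' ∧ pvOk row col g' := by
  have hlen : g.length = row.toNat := hok.1.1
  obtain ⟨k1, hk1, hik1⟩ := pvIdx_some g.length (r - 1) (by rw [hlen]; omega) (by rw [hlen]; omega)
  have hgk1 : g[k1]? = some g[k1] := List.getElem?_eq_getElem hk1
  have hg1 : PySem.List.pyGet? g (r - 1) = some g[k1] := by
    simp only [PySem.List.pyGet?]
    rw [hik1]
    simpa using hgk1
  have hrlen : g[k1].length = col.toNat := hok.1.2 _ (List.getElem_mem hk1)
  obtain ⟨k2, hk2, hik2⟩ := pvIdx_some g[k1].length (c - 1) (by rw [hrlen]; omega) (by rw [hrlen]; omega)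
  have hset1 : PySem.List.pySet? g[k1] (c - 1) 1 = some (g[k1].set k2 1) := by
    simp only [PySem.List.pySet?]
    rw [hik2]
    rfl
  have hset2 : PySem.List.pySet? g (r - 1) (g[k1].set k2 1) = some (g.set k1 (g[k1].set k2 1)) := by
    simp only [PySem.List.pySet?]
    rw [hik1]
    rfl
  refine ⟨g.set k1 (g[k1].set k2 1), ?_, ?_, ?_⟩
  · rw [hg1]
    simp only [Option.bind_some]
    rw [hset1]
    simp only [Option.bind_some]
    exact hset2
  · constructor
    · rw [List.length_set, hlen]
    · intro x hx
      rcases List.mem_or_eq_of_mem_set hx with h | h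
      · exact hok.1.2 x h
      · subst h; rw [List.length_set, hrlen]
  · intro a b hin
    obtain ⟨rwa, hga, hlena, hvala⟩ := pvShape_cell 9 hok.1 hin
    rw [pvGet_eq 9 _ a b hin.1 hin.2.2.1]
    by_cases ha : a.toNat = k1
    · subst ha
      rw [List.getElem?_set_self hk1]
      rw [hga] at hgk1
      have hrwa : rwa = g[a.toNat] := by injection hgk1
      subst hrwa
      by_cases hb : b.toNat = k2
      · subst hb
        rw [Option.getD_some, List.getElem?_set_self (by omega)]
        simp
      · rw [Option.getD_some, List.getElem?_set_ne (fun h => hb h.symm), hvala]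
        simpa using hok.2 a b hin
    · rw [List.getElem?_set_ne (fun h => ha h.symm), hga, Option.getD_some, hvala]
      simpa using hok.2 a b hin

theorem pvMark_ok (row col : Int) :
    ∀ (taken : List (List Int)) (g : List (List Int)), pvOk row col g →
      (∀ xs ∈ taken, xs.length = 2 ∧ -row ≤ xs.getD 0 0 - 1 ∧ xs.getD 0 0 - 1 < row ∧
        -col ≤ xs.getD 1 0 - 1 ∧ xs.getD 1 0 - 1 < col) →
      ∃ g0, pvMark g taken = some g0 ∧ pvOk row col g0 := by
  intro taken
  induction taken with
  | nil => intro g hok _; exact ⟨g, rfl, hok⟩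
  | cons xs t ih =>
    intro g hok hcond
    obtain ⟨hlen2, b1, b2, b3, b4⟩ := hcond xs (List.mem_cons_self)
    obtain ⟨r, c, rfl⟩ := List.length_eq_two.1 hlen2
    simp only [List.getD_cons_zero, List.getD_cons_succ] at b1 b2 b3 b4
    obtain ⟨g', hstep, hok'⟩ := pvMarkStep row col g hok r c b1 b2 b3 b4
    obtain ⟨g0, hm, hok0⟩ := ih g' hok' (fun ys hy => hcond ys (List.mem_cons_of_mem _ hy))
    refine ⟨g0, ?_, hok0⟩
    simp only [pvMark, List.foldl_cons, Option.bind_some] at hm ⊢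
    rw [hstep]
    exact hm

theorem pvGrid_ok (row col : Int) :
    pvOk row col (pvGrid row col) ∧
      ∀ a b, pvInb row col a b → pvGet 9 (pvGrid row col) a b = 0 := by
  have hval : ∀ a b, pvInb row col a b → pvGet 9 (pvGrid row col) a b = 0 := by
    intro a b hin
    obtain ⟨h1, h2, h3, h4⟩ := hin
    rw [pvGet_eq 9 _ a b h1 h3]
    have ha : a.toNat < (PySem.List.pyRange 0 row 1).length := by
      rw [PySem.List.length_pyRange_one]; omega
    rw [pvGrid, List.getElem?_map, List.getElem?_eq_getElem ha]
    simp only [Option.map_some, Option.getD_some, PySem.List.pyRepeat_singleton,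
      List.getElem?_replicate]
    rw [if_pos (by omega : b.toNat < col.toNat)]
    rfl
  have hshape : pvShape row col (pvGrid row col) := by
    constructor
    · rw [pvGrid, List.length_map, PySem.List.length_pyRange_one]
      omega
    · intro x hx
      rw [pvGrid] at hx
      obtain ⟨i, -, rfl⟩ := List.mem_map.1 hx
      rw [PySem.List.pyRepeat_singleton, List.length_replicate]
  exact ⟨⟨hshape, fun a b hin => Or.inl (hval a b hin)⟩, hval⟩

structure pvSInv (row col : Int) (g0 : List (List Int))
    (s : List (List Int) × List (Int × Int)) : Prop where
  shape : pvShape row col s.1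
  rel : ∀ a b, pvInb row col a b → pvGet 9 s.1 a b = -1 ∨ pvGet 9 s.1 a b = pvGet 9 g0 a b
  vis : ∀ a b, pvInb row col a b → pvGet 9 s.1 a b = -1 → pvReach row col g0 a b
  q2 : ∀ p ∈ s.2, pvInb row col p.1 p.2 ∧ pvGet 9 s.1 p.1 p.2 = -1
  allq : ∀ a b, pvInb row col a b → pvGet 9 s.1 a b = -1 → (a, b) ∈ s.2

theorem pvSeed_fold (row col : Int) (g0 : List (List Int)) (hrow : 1 ≤ row) :
    ∀ (l : List Int) (s : List (List Int) × List (Int × Int)),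
      (∀ i ∈ l, 0 ≤ i ∧ i < col) → pvSInv row col g0 s →
      pvSInv row col g0 (l.foldl (fun s i =>
          if pvGet 9 s.1 0 i = 0 then (pvSet s.1 0 i (-1), s.2 ++ [((0 : Int), i)]) else s) s) ∧
      (∀ a b, pvInb row col a b → pvGet 9 s.1 a b = -1 →
        pvGet 9 (l.foldl (fun s i =>
          if pvGet 9 s.1 0 i = 0 then (pvSet s.1 0 i (-1), s.2 ++ [((0 : Int), i)]) else s) s).1 a b = -1) ∧
      (∀ i ∈ l, pvLand row col g0 0 i →
        pvGet 9 (l.foldl (fun s i =>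
          if pvGet 9 s.1 0 i = 0 then (pvSet s.1 0 i (-1), s.2 ++ [((0 : Int), i)]) else s) s).1 0 i = -1) := by
  intro l
  induction l with
  | nil =>
    intro s _ hs
    exact ⟨hs, fun a b _ h => h, by simp⟩
  | cons i l ih =>
    intro s hl hs
    have hb := hl i (List.mem_cons_self)
    have hin : pvInb row col 0 i := ⟨le_rfl, by omega, hb.1, hb.2⟩
    rw [List.foldl_cons]
    by_cases hguard : pvGet 9 s.1 0 i = 0
    · rw [if_pos hguard]
      have hself : pvGet 9 (pvSet s.1 0 i (-1)) 0 i = -1 :=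
        pvGet_set_self 9 (-1) hs.shape hin
      have keep : ∀ a b, 0 ≤ a → 0 ≤ b → pvGet 9 s.1 a b = -1 →
          pvGet 9 (pvSet s.1 0 i (-1)) a b = -1 := by
        intro a b ha hbb hv
        by_cases he : a = 0 ∧ b = i
        · rw [he.1, he.2]; exact hself
        · rw [pvGet_set_ne 9 (-1) hs.shape hin a b ha hbb he]; exact hv
      have hland : pvGet 9 g0 0 i = 0 := by
        rcases hs.rel 0 i hin with hv | he
        · rw [hguard] at hv; exact absurd hv (by decide)
        · rw [← he, hguard]
      have hs' : pvSInv row col g0 (pvSet s.1 0 i (-1), s.2 ++ [((0 : Int), i)]) := by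
        refine { shape := pvShape_set _ hs.shape hin, rel := ?_, vis := ?_, q2 := ?_, allq := ?_ }
        · intro a b hab
          by_cases he : a = 0 ∧ b = i
          · rw [he.1, he.2]; exact Or.inl hself
          · rw [pvGet_set_ne 9 (-1) hs.shape hin a b hab.1 hab.2.2.1 he]; exact hs.rel a b hab
        · intro a b hab hv
          by_cases he : a = 0 ∧ b = i
          · rw [he.1, he.2]; exact pvReach.top i ⟨hin, hland⟩
          · rw [pvGet_set_ne 9 (-1) hs.shape hin a b hab.1 hab.2.2.1 he] at hv
            exact hs.vis a b hab hv
        · intro p hp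
          rcases List.mem_append.1 hp with hp | hp
          · obtain ⟨hpi, hpv⟩ := hs.q2 p hp
            exact ⟨hpi, keep p.1 p.2 hpi.1 hpi.2.2.1 hpv⟩
          · simp only [List.mem_singleton] at hp
            subst hp
            exact ⟨hin, hself⟩
        · intro a b hab hv
          by_cases he : a = 0 ∧ b = i
          · refine List.mem_append_right _ ?_
            simp [he.1, he.2]
          · rw [pvGet_set_ne 9 (-1) hs.shape hin a b hab.1 hab.2.2.1 he] at hv
            exact List.mem_append_left _ (hs.allq a b hab hv)
      obtain ⟨ih1, ih2, ih3⟩ := ih _ (fun j hj => hl j (List.mem_cons_of_mem _ hj)) hs'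
      refine ⟨ih1, ?_, ?_⟩
      · intro a b hab hv
        exact ih2 a b hab (keep a b hab.1 hab.2.2.1 hv)
      · intro j hj hlj
        rcases List.mem_cons.1 hj with rfl | hj
        · exact ih2 0 j hin hself
        · exact ih3 j hj hlj
    · rw [if_neg hguard]
      obtain ⟨ih1, ih2, ih3⟩ := ih _ (fun j hj => hl j (List.mem_cons_of_mem _ hj)) hs
      refine ⟨ih1, ih2, ?_⟩
      intro j hj hlj
      rcases List.mem_cons.1 hj with rfl | hj
      · have hv : pvGet 9 s.1 0 j = -1 := by
          rcases hs.rel 0 j hin with hv | he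
          · exact hv
          · rw [he, hlj.2] at hguard; exact absurd rfl hguard
        exact ih2 0 j hin hv
      · exact ih3 j hj hlj

theorem pvSeed_inv (row col : Int) (g0 : List (List Int)) (hrow : 1 ≤ row)
    (hok : pvOk row col g0) :
    pvInvA row col g0 (pvSeed col g0).1 (pvSeed col g0).2 := by
  have h0 : pvSInv row col g0 (g0, []) := by
    refine { shape := hok.1, rel := fun a b _ => Or.inr rfl, vis := ?_, q2 := ?_, allq := ?_ }
    · intro a b hin hv
      rcases hok.2 a b hin with h | h <;> rw [hv] at h <;> exact absurd h (by decide)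
    · intro p hp; exact absurd hp (List.not_mem_nil)
    · intro a b hin hv
      rcases hok.2 a b hin with h | h <;> rw [hv] at h <;> exact absurd h (by decide)
  obtain ⟨hs, hmono, hcov⟩ := pvSeed_fold row col g0 hrow (PySem.List.pyRange 0 col 1) (g0, [])
    (fun i hi => by
      have := PySem.List.mem_pyRange_one.1 hi
      omega) h0
  exact pvInvA.mk hs.shape hs.rel hs.vis hs.q2
    (fun cc hl => hcov cc (PySem.List.mem_pyRange_one.2 ⟨hl.1.2.2.1, hl.1.2.2.2⟩) hl)
    (fun a b hin hv hnq => absurd (hs.allq a b hin hv) hnq)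

def pvCond (row col : Int) (g0 : List (List Int)) (R : List (List Bool)) (r c : Int) : Prop :=
  pvGet false R r c = false ∧ pvGet 9 g0 r c = 0 ∧
    ((r + 1 < row ∧ pvGet false R (r + 1) c = true) ∨
     (0 ≤ r - 1 ∧ pvGet false R (r - 1) c = true) ∨
     (c + 1 < col ∧ pvGet false R r (c + 1) = true) ∨
     (0 ≤ c - 1 ∧ pvGet false R r (c - 1) = true))

def pvRv (row col : Int) (g0 : List (List Int)) (R : List (List Bool)) : Prop :=
  ∀ a b, pvInb row col a b → pvGet false R a b = true → pvReach row col g0 a b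

structure pvPInv (row col : Int) (g0 : List (List Int)) (R : List (List Bool))
    (s : List (List Bool) × Bool) : Prop where
  shape : pvShape row col s.1
  rv : pvRv row col g0 s.1
  mono : ∀ a b, pvInb row col a b → pvGet false R a b = true → pvGet false s.1 a b = true
  chfa : s.2 = false → s.1 = R
  fles : pvFalses s.1 ≤ pvFalses R
  chtr : s.2 = true → pvFalses s.1 < pvFalses R

theorem pvPInner_step {row col : Int} {g0 : List (List Int)} {R : List (List Bool)}
    {r : Int} (hr : 0 ≤ r) (hr2 : r < row) {c : Int} (hc : 0 ≤ c) (hc2 : c < col)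
    {s : List (List Bool) × Bool} (hp : pvPInv row col g0 R s) :
    pvPInv row col g0 R
      (if pvGet false s.1 r c = false ∧ pvGet 9 g0 r c = 0 ∧
          ((r + 1 < row ∧ pvGet false s.1 (r + 1) c = true) ∨
           (0 ≤ r - 1 ∧ pvGet false s.1 (r - 1) c = true) ∨
           (c + 1 < col ∧ pvGet false s.1 r (c + 1) = true) ∨
           (0 ≤ c - 1 ∧ pvGet false s.1 r (c - 1) = true)) then
        (pvSet s.1 r c true, true)
      else s) := by
  split_ifs with h
  · obtain ⟨h1, h2, h3⟩ := h
    have hin : pvInb row col r c := ⟨hr, hr2, hc, hc2⟩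
    have hland : pvLand row col g0 r c := ⟨hin, h2⟩
    have hself : pvGet false (pvSet s.1 r c true) r c = true :=
      pvGet_set_self false true hp.shape hin
    have keep : ∀ a b, 0 ≤ a → 0 ≤ b → pvGet false s.1 a b = true →
        pvGet false (pvSet s.1 r c true) a b = true := by
      intro a b ha hb hv
      by_cases he : a = r ∧ b = c
      · rw [he.1, he.2]; exact hself
      · rw [pvGet_set_ne false true hp.shape hin a b ha hb he]; exact hv
    have hreach : pvReach row col g0 r c := by
      rcases h3 with ⟨hlt, hget⟩ | ⟨hlt, hget⟩ | ⟨hlt, hget⟩ | ⟨hlt, hget⟩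
      · exact pvReach.step (r + 1) c r c
          (hp.rv (r + 1) c ⟨by omega, hlt, hc, hc2⟩ hget) hland
          (Or.inr (Or.inl ⟨by omega, rfl⟩))
      · exact pvReach.step (r - 1) c r c
          (hp.rv (r - 1) c ⟨hlt, by omega, hc, hc2⟩ hget) hland
          (Or.inl ⟨by omega, rfl⟩)
      · exact pvReach.step r (c + 1) r c
          (hp.rv r (c + 1) ⟨hr, hr2, by omega, hlt⟩ hget) hland
          (Or.inr (Or.inr (Or.inr ⟨rfl, by omega⟩)))
      · exact pvReach.step r (c - 1) r c
          (hp.rv r (c - 1) ⟨hr, hr2, hlt, by omega⟩ hget) hland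
          (Or.inr (Or.inr (Or.inl ⟨rfl, by omega⟩)))
    have hdec := pvFalses_set hp.shape hin h1
    refine { shape := pvShape_set _ hp.shape hin, rv := ?_, mono := ?_, chfa := ?_,
             fles := ?_, chtr := ?_ }
    · intro a b hab hv
      by_cases he : a = r ∧ b = c
      · rw [he.1, he.2] at hv ⊢; exact hreach
      · rw [pvGet_set_ne false true hp.shape hin a b hab.1 hab.2.2.1 he] at hv
        exact hp.rv a b hab hv
    · intro a b hab hv
      exact keep a b hab.1 hab.2.2.1 (hp.mono a b hab hv)
    · intro hff; exact absurd hff (by simp)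
    · show pvFalses (pvSet s.1 r c true) ≤ pvFalses R
      have := hp.fles; omega
    · intro _
      show pvFalses (pvSet s.1 r c true) < pvFalses R
      have := hp.fles; omega
  · exact hp

theorem pvPInner_fold {row col : Int} {g0 : List (List Int)} {R : List (List Bool)}
    {r : Int} (hr : 0 ≤ r) (hr2 : r < row) :
    ∀ (lc : List Int) (s : List (List Bool) × Bool), (∀ c ∈ lc, 0 ≤ c ∧ c < col) →
      pvPInv row col g0 R s →
      pvPInv row col g0 R (lc.foldl (fun s c =>
        if pvGet false s.1 r c = false ∧ pvGet 9 g0 r c = 0 ∧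
            ((r + 1 < row ∧ pvGet false s.1 (r + 1) c = true) ∨
             (0 ≤ r - 1 ∧ pvGet false s.1 (r - 1) c = true) ∨
             (c + 1 < col ∧ pvGet false s.1 r (c + 1) = true) ∨
             (0 ≤ c - 1 ∧ pvGet false s.1 r (c - 1) = true)) then
          (pvSet s.1 r c true, true)
        else s) s) := by
  intro lc
  induction lc with
  | nil => intro s _ hp; exact hp
  | cons c lc ih =>
    intro s hl hp
    rw [List.foldl_cons]
    have hb := hl c (List.mem_cons_self)
    exact ih _ (fun x hx => hl x (List.mem_cons_of_mem _ hx))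
      (pvPInner_step hr hr2 hb.1 hb.2 hp)

theorem pvPass_inv {row col : Int} {g0 : List (List Int)} {R : List (List Bool)}
    (hsR : pvShape row col R) (hrv : pvRv row col g0 R) :
    pvPInv row col g0 R (pvPass row col g0 R) := by
  have base : pvPInv row col g0 R (R, false) :=
    { shape := hsR, rv := hrv, mono := fun a b _ h => h, chfa := fun _ => rfl,
      fles := le_rfl, chtr := fun h => absurd h (by simp) }
  rw [pvPass]
  have : ∀ (lr : List Int) (s : List (List Bool) × Bool), (∀ r ∈ lr, 0 ≤ r ∧ r < row) →
      pvPInv row col g0 R s →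
      pvPInv row col g0 R (lr.foldl (fun s r => pvPassInner row col g0 r s) s) := by
    intro lr
    induction lr with
    | nil => intro s _ hp; exact hp
    | cons r lr ih =>
      intro s hl hp
      rw [List.foldl_cons]
      have hb := hl r (List.mem_cons_self)
      refine ih _ (fun x hx => hl x (List.mem_cons_of_mem _ hx)) ?_
      rw [pvPassInner]
      exact pvPInner_fold hb.1 hb.2 _ s
        (fun x hx => by have := PySem.List.mem_pyRange_one.1 hx; omega) hp
  exact this _ _ (fun x hx => by have := PySem.List.mem_pyRange_one.1 hx; omega) base

def pvIStep (row col : Int) (g : List (List Int)) (r : Int)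
    (s : List (List Bool) × Bool) (c : Int) : List (List Bool) × Bool :=
  if pvGet false s.1 r c = false ∧ pvGet 9 g r c = 0 ∧
      ((r + 1 < row ∧ pvGet false s.1 (r + 1) c = true) ∨
       (0 ≤ r - 1 ∧ pvGet false s.1 (r - 1) c = true) ∨
       (c + 1 < col ∧ pvGet false s.1 r (c + 1) = true) ∨
       (0 ≤ c - 1 ∧ pvGet false s.1 r (c - 1) = true)) then
    (pvSet s.1 r c true, true)
  else s

theorem pvPassInner_eq (row col : Int) (g : List (List Int)) (r : Int)
    (s : List (List Bool) × Bool) :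
    pvPassInner row col g r s = (PySem.List.pyRange 0 col 1).foldl (pvIStep row col g r) s := rfl

theorem pvIStep_ch (row col : Int) (g : List (List Int)) (r : Int)
    (s : List (List Bool) × Bool) (c : Int) (h : s.2 = true) :
    (pvIStep row col g r s c).2 = true := by
  unfold pvIStep
  split_ifs <;> simpa

theorem pvIFold_ch (row col : Int) (g : List (List Int)) (r : Int) :
    ∀ (lc : List Int) (s : List (List Bool) × Bool), s.2 = true →
      ((lc.foldl (pvIStep row col g r) s).2 = true) := by
  intro lc
  induction lc with
  | nil => intro s h; exact h
  | cons c lc ih => intro s h; exact ih _ (pvIStep_ch row col g r s c h)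

theorem pvIFold_chfa (row col : Int) (g : List (List Int)) (r : Int) :
    ∀ (lc : List Int) (s : List (List Bool) × Bool),
      (lc.foldl (pvIStep row col g r) s).2 = false →
      lc.foldl (pvIStep row col g r) s = s := by
  intro lc
  induction lc with
  | nil => intro s _; rfl
  | cons c lc ih =>
    intro s h
    rw [List.foldl_cons] at h ⊢
    have h2 := ih _ h
    have hstep : pvIStep row col g r s c = s := by
      by_cases hcond : pvGet false s.1 r c = false ∧ pvGet 9 g r c = 0 ∧
          ((r + 1 < row ∧ pvGet false s.1 (r + 1) c = true) ∨
           (0 ≤ r - 1 ∧ pvGet false s.1 (r - 1) c = true) ∨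
           (c + 1 < col ∧ pvGet false s.1 r (c + 1) = true) ∨
           (0 ≤ c - 1 ∧ pvGet false s.1 r (c - 1) = true))
      · exfalso
        rw [h2] at h
        unfold pvIStep at h
        rw [if_pos hcond] at h
        simp at h
      · unfold pvIStep
        rw [if_neg hcond]
    rw [hstep] at h2 ⊢
    exact h2

theorem pvIFold_hit (row col : Int) (g : List (List Int)) (R : List (List Bool)) (r : Int) :
    ∀ (lc : List Int) (s : List (List Bool) × Bool) (c0 : Int), c0 ∈ lc →
      (s.2 = false → s.1 = R) → pvCond row col g R r c0 →
      (lc.foldl (pvIStep row col g r) s).2 = true := by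
  intro lc
  induction lc with
  | nil => intro s c0 h; exact absurd h (List.not_mem_nil)
  | cons c1 lc ih =>
    intro s c0 hmem hfa hcond
    rw [List.foldl_cons]
    cases hs2 : s.2 with
    | true => exact pvIFold_ch row col g r lc _ (pvIStep_ch row col g r s c1 hs2)
    | false =>
      have hs1 : s.1 = R := hfa hs2
      rcases List.mem_cons.1 hmem with rfl | hmem'
      · have htaken : (pvIStep row col g r s c0).2 = true := by
          unfold pvIStep
          rw [if_pos (by rw [hs1]; exact hcond)]
        exact pvIFold_ch row col g r lc _ htaken
      · by_cases hc1 : pvGet false s.1 r c1 = false ∧ pvGet 9 g r c1 = 0 ∧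
            ((r + 1 < row ∧ pvGet false s.1 (r + 1) c1 = true) ∨
             (0 ≤ r - 1 ∧ pvGet false s.1 (r - 1) c1 = true) ∨
             (c1 + 1 < col ∧ pvGet false s.1 r (c1 + 1) = true) ∨
             (0 ≤ c1 - 1 ∧ pvGet false s.1 r (c1 - 1) = true))
        · have htaken : (pvIStep row col g r s c1).2 = true := by
            unfold pvIStep
            rw [if_pos hc1]
          exact pvIFold_ch row col g r lc _ htaken
        · have hstep : pvIStep row col g r s c1 = s := by
            unfold pvIStep
            rw [if_neg hc1]
          rw [hstep]
          exact ih s c0 hmem' hfa hcond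

theorem pvOFold_ch (row col : Int) (g : List (List Int)) :
    ∀ (lr : List Int) (s : List (List Bool) × Bool), s.2 = true →
      ((lr.foldl (fun s r => pvPassInner row col g r s) s).2 = true) := by
  intro lr
  induction lr with
  | nil => intro s h; exact h
  | cons r lr ih =>
    intro s h
    rw [List.foldl_cons]
    exact ih _ (by rw [pvPassInner_eq]; exact pvIFold_ch row col g r _ s h)

theorem pvOFold_chfa (row col : Int) (g : List (List Int)) :
    ∀ (lr : List Int) (s : List (List Bool) × Bool),
      ((lr.foldl (fun s r => pvPassInner row col g r s) s).2 = false) →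
      lr.foldl (fun s r => pvPassInner row col g r s) s = s := by
  intro lr
  induction lr with
  | nil => intro s _; rfl
  | cons r lr ih =>
    intro s h
    rw [List.foldl_cons] at h ⊢
    have h2 := ih _ h
    have hstep : pvPassInner row col g r s = s := by
      rw [h2] at h
      rw [pvPassInner_eq] at h ⊢
      exact pvIFold_chfa row col g r _ s h
    rw [hstep] at h2 ⊢
    exact h2

theorem pvOFold_hit (row col : Int) (g : List (List Int)) (R : List (List Bool)) :
    ∀ (lr : List Int) (s : List (List Bool) × Bool) (r0 c0 : Int), r0 ∈ lr →
      0 ≤ c0 → c0 < col → (s.2 = false → s.1 = R) → pvCond row col g R r0 c0 →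
      ((lr.foldl (fun s r => pvPassInner row col g r s) s).2 = true) := by
  intro lr
  induction lr with
  | nil => intro s r0 c0 h; exact absurd h (List.not_mem_nil)
  | cons r1 lr ih =>
    intro s r0 c0 hmem hc1 hc2 hfa hcond
    rw [List.foldl_cons]
    cases hs2 : s.2 with
    | true =>
      exact pvOFold_ch row col g lr _ (by rw [pvPassInner_eq]; exact pvIFold_ch row col g r1 _ s hs2)
    | false =>
      rcases List.mem_cons.1 hmem with rfl | hmem'
      · have ht : (pvPassInner row col g r0 s).2 = true := by
          rw [pvPassInner_eq]
          exact pvIFold_hit row col g R r0 _ s c0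
            (PySem.List.mem_pyRange_one.2 ⟨hc1, hc2⟩) hfa hcond
        exact pvOFold_ch row col g lr _ ht
      · cases hch : (pvPassInner row col g r1 s).2 with
        | true => exact pvOFold_ch row col g lr _ hch
        | false =>
          have hstep : pvPassInner row col g r1 s = s := by
            rw [pvPassInner_eq] at hch ⊢
            exact pvIFold_chfa row col g r1 _ s hch
          rw [hstep]
          exact ih s r0 c0 hmem' hc1 hc2 hfa hcond

theorem pvPass_fix {row col : Int} {g : List (List Int)} {R : List (List Bool)}
    (h : (pvPass row col g R).2 = false) :
    ∀ r c, pvInb row col r c → ¬ pvCond row col g R r c := by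
  intro r c hin hcond
  have := pvOFold_hit row col g R (PySem.List.pyRange 0 row 1) (R, false) r c
    (PySem.List.mem_pyRange_one.2 ⟨hin.1, hin.2.1⟩) hin.2.2.1 hin.2.2.2
    (fun _ => rfl) hcond
  rw [pvPass] at h
  rw [this] at h
  exact absurd h (by decide)

theorem pvPass_false_eq {row col : Int} {g : List (List Int)} {R : List (List Bool)}
    (h : (pvPass row col g R).2 = false) : (pvPass row col g R).1 = R := by
  rw [pvPass] at h ⊢
  rw [pvOFold_chfa row col g _ _ h]

theorem pvSat_succ (row col : Int) (g : List (List Int)) (n : Nat) (R : List (List Bool)) :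
    pvSat row col g (n + 1) R =
      if (pvPass row col g R).2 then pvSat row col g n (pvPass row col g R).1
      else (pvPass row col g R).1 := rfl

theorem pvReach0_get {row col : Int} {g : List (List Int)} {a b : Int}
    (hin : pvInb row col a b) :
    pvGet false (pvReach0 row col g) a b = (decide (a = 0) && (pvGet 9 g a b == 0)) := by
  obtain ⟨h1, h2, h3, h4⟩ := hin
  unfold pvGet pvReach0
  rw [PySem.List.pyGetD_map_pyRange_of_nonneg _ row a [] h1 h2]
  rw [PySem.List.pyGetD_map_pyRange_of_nonneg _ col b false h3 h4]
  rfl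

theorem pvReach0_shape (row col : Int) (g : List (List Int)) :
    pvShape row col (pvReach0 row col g) := by
  constructor
  · simp [pvReach0, PySem.List.length_pyRange_one]
  · intro x hx
    rw [pvReach0] at hx
    obtain ⟨i, -, rfl⟩ := List.mem_map.1 hx
    simp [PySem.List.length_pyRange_one]

theorem pvSat_ok {row col : Int} {g0 : List (List Int)} :
    ∀ (fuel : Nat) (R : List (List Bool)), pvShape row col R → pvRv row col g0 R →
      (∀ cc, pvLand row col g0 0 cc → pvGet false R 0 cc = true) → pvFalses R < fuel →
      pvShape row col (pvSat row col g0 fuel R) ∧ pvRv row col g0 (pvSat row col g0 fuel R) ∧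
      (∀ cc, pvLand row col g0 0 cc →
        pvGet false (pvSat row col g0 fuel R) 0 cc = true) ∧
      (∀ r c, pvInb row col r c → ¬ pvCond row col g0 (pvSat row col g0 fuel R) r c) := by
  intro fuel
  induction fuel with
  | zero => intro R _ _ _ h; omega
  | succ n ih =>
    intro R hsh hrv hseed hf
    have hp := pvPass_inv hsh hrv
    cases hch : (pvPass row col g0 R).2 with
    | true =>
      rw [pvSat_succ, hch, if_pos rfl]
      exact ih _ hp.shape hp.rv (fun cc hl => hp.mono 0 cc hl.1 (hseed cc hl))
        (by have := hp.chtr hch; omega)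
    | false =>
      rw [pvSat_succ, hch, if_neg (by simp), pvPass_false_eq hch]
      exact ⟨hsh, hrv, hseed, pvPass_fix hch⟩

theorem pvSat_complete {row col : Int} {g0 : List (List Int)} {Rf : List (List Bool)}
    (hseed : ∀ cc, pvLand row col g0 0 cc → pvGet false Rf 0 cc = true)
    (hfix : ∀ r c, pvInb row col r c → ¬ pvCond row col g0 Rf r c) :
    ∀ r c, pvReach row col g0 r c → pvGet false Rf r c = true := by
  intro r c h
  induction h with
  | top cc hl => exact hseed cc hl
  | step a b a' b' hr hl hadj ih =>
    by_contra hf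
    simp only [Bool.not_eq_true] at hf
    apply hfix a' b' hl.1
    obtain ⟨q1, q2, q3, q4⟩ := (pvReach_land hr).1
    obtain ⟨p1, p2, p3, p4⟩ := hl.1
    refine ⟨hf, hl.2, ?_⟩
    rcases hadj with ⟨e1, e2⟩ | ⟨e1, e2⟩ | ⟨e1, e2⟩ | ⟨e1, e2⟩
    · refine Or.inr (Or.inl ⟨by omega, ?_⟩)
      have h1 : a' - 1 = a := by omega
      rw [h1, e2]; exact ih
    · refine Or.inl ⟨by omega, ?_⟩
      have h1 : a' + 1 = a := by omega
      rw [h1, e2]; exact ih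
    · refine Or.inr (Or.inr (Or.inr ⟨by omega, ?_⟩))
      have h1 : b' - 1 = b := by omega
      rw [e1, h1]; exact ih
    · refine Or.inr (Or.inr (Or.inl ⟨by omega, ?_⟩))
      have h1 : b' + 1 = b := by omega
      rw [e1, h1]; exact ih

theorem pvAny_iff {row col : Int} {Rf : List (List Bool)} (hrow : 1 ≤ row)
    (hsh : pvShape row col Rf) :
    ((PySem.List.pyGetD Rf (row - 1) []).any id = true) ↔
      ∃ cc, pvInb row col (row - 1) cc ∧ pvGet false Rf (row - 1) cc = true := by
  have hlen : Rf.length = row.toNat := hsh.1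
  have hlt : row.toNat - 1 < Rf.length := by omega
  have hnat : row - 1 = ((row.toNat - 1 : Nat) : Int) := by omega
  have hrlen : Rf[row.toNat - 1].length = col.toNat := hsh.2 _ (List.getElem_mem hlt)
  rw [hnat, PySem.List.pyGetD_natCast, List.getD_eq_getElem?_getD,
    List.getElem?_eq_getElem hlt, Option.getD_some, List.any_eq_true]
  constructor
  · rintro ⟨x, hx, hid⟩
    obtain ⟨k, hk, rfl⟩ := List.mem_iff_getElem.1 hx
    refine ⟨(k : Int), ⟨by omega, by omega, by omega, by omega⟩, ?_⟩
    rw [pvGet_eq false Rf _ _ (by omega) (by omega)]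
    have h2 : ((row.toNat - 1 : Nat) : Int).toNat = row.toNat - 1 := by omega
    rw [h2, List.getElem?_eq_getElem hlt, Option.getD_some]
    have h3 : ((k : Nat) : Int).toNat = k := by omega
    rw [h3, List.getElem?_eq_getElem hk, Option.getD_some]
    simpa using hid
  · rintro ⟨cc, hin, hv⟩
    rw [pvGet_eq false Rf _ _ hin.1 hin.2.2.1] at hv
    have h2 : ((row.toNat - 1 : Nat) : Int).toNat = row.toNat - 1 := by omega
    rw [h2, List.getElem?_eq_getElem hlt, Option.getD_some] at hv
    cases hq : (Rf[row.toNat - 1])[cc.toNat]? with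
    | none => rw [hq] at hv; simp at hv
    | some x =>
      rw [hq] at hv
      simp only [Option.getD_some] at hv
      exact ⟨x, List.mem_of_getElem? hq, by simpa using hv⟩

theorem pvMain (row col : Int) (g0 : List (List Int)) (hrow : 1 ≤ row)
    (hok : pvOk row col g0) :
    pvBfs row col (pvSeed col g0).1 (pvSeed col g0).2 =
      (decide (1 ≤ row) &&
        (PySem.List.pyGetD (pvSat row col g0 (pvFalses (pvReach0 row col g0) + 1)
          (pvReach0 row col g0)) (row - 1) []).any id) := by
  have hrv0 : pvRv row col g0 (pvReach0 row col g0) := by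
    intro a b hin hv
    rw [pvReach0_get hin] at hv
    simp only [Bool.and_eq_true, decide_eq_true_eq, beq_iff_eq] at hv
    obtain ⟨ha0, hval⟩ := hv
    subst ha0
    exact pvReach.top b ⟨hin, hval⟩
  have hseed0 : ∀ cc, pvLand row col g0 0 cc →
      pvGet false (pvReach0 row col g0) 0 cc = true := by
    intro cc hl
    rw [pvReach0_get hl.1]
    simp [hl.2]
  obtain ⟨hshf, hrvf, hseedf, hfixf⟩ := pvSat_ok (pvFalses (pvReach0 row col g0) + 1)
    (pvReach0 row col g0) (pvReach0_shape row col g0) hrv0 hseed0 (by omega)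
  have hdec : decide (1 ≤ row) = true := by simp [hrow]
  rw [hdec, Bool.true_and, Bool.eq_iff_iff]
  rw [pvBfs_iff row col g0 _ _ (pvSeed_inv row col g0 hrow hok), pvAny_iff hrow hshf]
  constructor
  · rintro ⟨c, hreach⟩
    have hl := pvReach_land hreach
    exact ⟨c, hl.1, pvSat_complete hseedf hfixf _ _ hreach⟩
  · rintro ⟨cc, hin, hv⟩
    exact ⟨cc, hrvf _ _ hin hv⟩

theorem pvBfs_nil (row col : Int) (g : List (List Int)) : pvBfs row col g [] = false := by
  rw [pvBfs]

theorem final_eq (row : Int) (col : Int) (cells : List (List Int)) (day : Int)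
    (hpre : Pre_isPossibleToCross row col cells day) :
    isPossibleToCross row col cells day = isPossibleToCross_alt row col cells day := by
  obtain ⟨hrc, hcells⟩ := hpre
  by_cases hrow : 1 ≤ row
  · unfold isPossibleToCross isPossibleToCross_alt
    obtain ⟨g0, hm, hok0⟩ := pvMark_ok row col _ (pvGrid row col) (pvGrid_ok row col).1 hcells
    rw [hm]
    exact pvMain row col g0 hrow hok0
  · have hcol : col ≤ 0 := by
      rcases hrc with h | h
      · omega
      · exact h
    have htaken : PySem.List.slice cells none (some day) = [] := by
      cases h : PySem.List.slice cells none (some day) with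
      | nil => rfl
      | cons x t =>
        have hx := hcells x (by rw [h]; exact List.mem_cons_self)
        omega
    unfold isPossibleToCross isPossibleToCross_alt
    rw [htaken]
    show pvBfs row col (pvSeed col (pvGrid row col)).1 (pvSeed col (pvGrid row col)).2 =
      (decide (1 ≤ row) &&
        (PySem.List.pyGetD (pvSat row col (pvGrid row col)
          (pvFalses (pvReach0 row col (pvGrid row col)) + 1)
          (pvReach0 row col (pvGrid row col))) (row - 1) []).any id)
    rw [decide_eq_false hrow, Bool.false_and, pvSeed, PySem.List.pyRange_one_eq_nil hcol,
      List.foldl_nil]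
    exact pvBfs_nil row col (pvGrid row col)

-- ===== VERDICT (by name: the statement is the Claim_ definition above) =====
theorem isPossibleToCross_spec : Claim_equal_isPossibleToCross := by
  unfold Claim_equal_isPossibleToCross
  intro row col cells day _ hpre
  unfold Spec_isPossibleToCross
  exact final_eq row col cells day hpre
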